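-- pv_equiv track=rewrite | github.com/theurs/tb1 | my_cerebras.py | format_models_for_telegram
-- ===== SOURCE A (Python) =====
-- from typing import Any, Dict, List, Optional, Tuple
--
-- def format_models_for_telegram(models: List[str]) -> str:
--     """
--     Categorizes, sorts, and formats a list of models for display in Telegram using Markdown.
--     Handles models with prefixes and numeric components for better organization.
--
--     Args:
--         models: A list of model names.
--
--     Returns:
--         A formatted string ready for Telegram.
--     """
--
--     categories: Dict[str, List[str]] = {}
--     for model in models:
--         parts = model.split('-')  # Splitting by '-' to account for prefixes. Customize if needed
--         prefix = parts[0] if parts else "Other" # Main category based on the prefix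
--         if prefix not in categories:
--             categories[prefix] = []
--         categories[prefix].append(model)
--
--     output = ""
--     sorted_categories = sorted(categories.keys())
--
--     def _sort_key(model: str):
--         parts = []
--         for part in model.split('-'):
--             if part.isdigit():
--                 parts.append(part.zfill(4))  # Pad with zeros to a fixed width (e.g., 4)
--             elif part.replace('.', '', 1).isdigit():
--                 parts.append(part)  # floats are okay to be compared as strings
--             else:
--                 parts.append(part)
--         return tuple(parts)
--
--     for category in sorted_categories:
--         output += f"**{category}:**\n"  # Bold category header
--         sorted_models = sorted(categories[category], key=lambda x: _sort_key(x)) # Sorting models intelligently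
--         output += "\n".join([f"- `{model}`" for model in sorted_models]) + "\n\n"
--
--     return output
-- ===== SOURCE B (Python) =====
-- def format_models_for_telegram(models):
--     """Dict-free rewrite: sorted distinct prefixes, then one filter+sort per category."""
--
--     def _sort_key(model):
--         return tuple(p.zfill(4) if p.isdigit() else p for p in model.split('-'))
--
--     prefixes = sorted({m.split('-')[0] for m in models})
--     return "".join(
--         "**%s:**\n" % p
--         + "\n".join("- `%s`" % m
--                     for m in sorted((m for m in models if m.split('-')[0] == p),
--                                     key=_sort_key))
--         + "\n\n"
--         for p in prefixes
--     )
-- ===== Notes on version B (the rewrite author's own statement) =====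
-- stated objective: alternative
-- what changed: Replaces A's grouping dict (conditional insert + append per model, then per-key lookup) by a dict-free decomposition: sorted distinct prefixes via sorted(set(...)), then one order-preserving filter + sort per category, joined into the output.
import Mathlib
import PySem

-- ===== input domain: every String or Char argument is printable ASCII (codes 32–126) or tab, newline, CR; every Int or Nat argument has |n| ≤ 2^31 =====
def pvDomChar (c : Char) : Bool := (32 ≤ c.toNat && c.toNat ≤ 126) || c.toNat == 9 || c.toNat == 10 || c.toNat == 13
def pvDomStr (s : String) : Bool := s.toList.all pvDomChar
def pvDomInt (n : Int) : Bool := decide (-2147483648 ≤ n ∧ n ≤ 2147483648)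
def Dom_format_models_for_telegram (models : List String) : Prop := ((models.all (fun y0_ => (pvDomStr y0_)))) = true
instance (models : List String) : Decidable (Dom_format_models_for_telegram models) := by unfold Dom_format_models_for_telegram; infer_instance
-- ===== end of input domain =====

-- B replaces A's grouping dict and per-category dict lookup by sorted distinct prefixes plus one
-- filter per category (objective: alternative decomposition, no speed claim).

-- ===== PORT A =====
-- model.split('-')  (the separator is nonempty, so split? is always `some`)
def pvSplitDash (s : String) : List String := (PySem.Str.split? s "-").getD []

-- part.replace('.', '', 1): hand-ported (PySem.Str.replace has no count argument);
-- exact for a single-character pattern with count 1: drop the first '.' if any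
def pvDropFirstDot : List Char → List Char
  | [] => []
  | c :: cs => if c = '.' then cs else c :: pvDropFirstDot cs

-- A's _sort_key: the `parts` list built by the loop, as a tuple-like List String
def pvSortKeyA (model : String) : List String :=
  (pvSplitDash model).foldl (fun parts part =>
    if PySem.Str.strIsdigit part then parts ++ [PySem.Str.zfill part 4]
    else if PySem.Str.strIsdigit (String.ofList (pvDropFirstDot part.toList)) then parts ++ [part]
    else parts ++ [part]) []

-- the body of A's grouping loop
def pvGroupStepA (cats : PySem.Dict String (List String)) (model : String) :
    PySem.Dict String (List String) :=
  let parts := pvSplitDash model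
  let pfx := match parts with | [] => "Other" | p :: _ => p
  let cats := if cats.contains pfx then cats else cats.insert pfx ([] : List String)
  cats.modify pfx [] (fun l => l ++ [model])

def format_models_for_telegram (models : List String) : String :=
  let categories : PySem.Dict String (List String) := models.foldl pvGroupStepA PySem.Dict.empty
  let sortedCategories := PySem.List.sorted categories.keys (fun x => x) false
  sortedCategories.foldl (fun output category =>
    let sortedModels := PySem.List.sorted (categories.getD category []) (fun x => pvSortKeyA x) false
    (output ++ ("**" ++ category ++ ":**\n"))
      ++ (PySem.Str.join "\n" (sortedModels.map (fun model => "- `" ++ model ++ "`")) ++ "\n\n")) ""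

-- ===== PORT B =====
-- m.split('-')[0]  (split of a string is never empty, so index 0 is in range)
def pvPrefixB (m : String) : String := PySem.List.pyGetD (pvSplitDash m) 0 ""

def pvSortKeyB (m : String) : List String :=
  (pvSplitDash m).map (fun p => if PySem.Str.strIsdigit p then PySem.Str.zfill p 4 else p)

def pvCategoryBlock (models : List String) (p : String) : String :=
  ("**" ++ p ++ ":**\n")
    ++ (PySem.Str.join "\n" ((PySem.List.sorted (models.filter (fun m => pvPrefixB m == p)) pvSortKeyB false).map
          (fun m => "- `" ++ m ++ "`"))
    ++ "\n\n")

def format_models_for_telegram_alt (models : List String) : String :=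
  PySem.Str.join ""
    ((PySem.List.sorted (PySem.Set.ofList (models.map pvPrefixB)) (fun x => x) false).map
      (pvCategoryBlock models))

-- ===== PRECONDITION & SPEC =====
def Spec_format_models_for_telegram (models : List String) (out : String) : Prop := out = format_models_for_telegram_alt models
instance (models : List String) (out : String) : Decidable (Spec_format_models_for_telegram models out) := by unfold Spec_format_models_for_telegram; infer_instance

-- ===== CLAIM (what is proved, stated in full; the proofs are below) =====
def Claim_equal_format_models_for_telegram : Prop := ∀ (models : List String), Dom_format_models_for_telegram models → Spec_format_models_for_telegram models (format_models_for_telegram models)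

-- ===== LEMMAS AND PROOFS =====

-- str.split never returns an empty list
theorem pvSplitOn_go_ne_nil (sep : List Char) (fuel : Nat) (s cur : List Char)
    (acc : List (List Char)) : PySem.Chars.splitOn.go sep fuel s cur acc ≠ [] := by
  induction fuel generalizing s cur acc with
  | zero => simp [PySem.Chars.splitOn.go]
  | succ n ih =>
    cases s with
    | nil => simp [PySem.Chars.splitOn.go]
    | cons c rest =>
      rw [PySem.Chars.splitOn.go]
      split
      · exact ih _ _ _
      · exact ih _ _ _

theorem pvSplitDash_ne_nil (s : String) : pvSplitDash s ≠ [] := by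
  simp [pvSplitDash, PySem.Str.split?, PySem.Chars.split?, PySem.Chars.splitOn]
  exact pvSplitOn_go_ne_nil _ _ _ _ _

-- A's prefix expression equals B's
theorem pvPrefix_eq (m : String) :
    (match pvSplitDash m with | [] => "Other" | p :: _ => p) = pvPrefixB m := by
  unfold pvPrefixB
  cases h : pvSplitDash m with
  | nil => exact absurd h (pvSplitDash_ne_nil m)
  | cons p t => simp [PySem.List.pyGetD_zero_cons]

-- A's _sort_key equals B's (the two non-digit branches both keep the part)
theorem pvSortKey_eq : pvSortKeyA = pvSortKeyB := by
  funext m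
  unfold pvSortKeyA pvSortKeyB
  have hstep : (fun (parts : List String) (part : String) =>
      if PySem.Str.strIsdigit part then parts ++ [PySem.Str.zfill part 4]
      else if PySem.Str.strIsdigit (String.ofList (pvDropFirstDot part.toList)) then parts ++ [part]
      else parts ++ [part])
      = (fun parts part => parts ++ [if PySem.Str.strIsdigit part then PySem.Str.zfill part 4 else part]) := by
    funext parts part
    split_ifs <;> rfl
  rw [hstep, PySem.List.foldl_append_singleton_eq_map]
  simp

-- the conditional-insert-then-append step is the `modify` step
theorem pvDictStep_eq (d : PySem.Dict String (List String)) (p m : String) :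
    (if d.contains p then d else d.insert p ([] : List String)).modify p [] (fun l => l ++ [m])
      = d.modify p [] (fun l => l ++ [m]) := by
  by_cases h : d.contains p = true
  · simp [h]
  · simp only [Bool.not_eq_true] at h
    simp only [h, Bool.false_eq_true, if_false, PySem.Dict.modify,
      PySem.Dict.getD_insert_self, PySem.Dict.insert_insert_self,
      PySem.Dict.getD_of_not_contains d [] h]

-- A's grouping step is the plain modify step keyed by B's prefix
theorem pvStepFun_eq :
    pvGroupStepA = (fun cats model => cats.modify (pvPrefixB model) [] (fun l => l ++ [model])) := by
  funext cats model
  unfold pvGroupStepA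
  dsimp only []
  rw [show (match pvSplitDash model with | [] => "Other" | p :: _ => p) = pvPrefixB model from
        pvPrefix_eq model]
  exact pvDictStep_eq cats (pvPrefixB model) model

-- the dict's keys are the distinct prefixes, in first-occurrence order
theorem pvKeys_eq (models : List String) :
    (models.foldl (fun cats model => cats.modify (pvPrefixB model) [] (fun l => l ++ [model]))
        PySem.Dict.empty).keys = PySem.Set.ofList (models.map pvPrefixB) := by
  rw [PySem.Dict.keys_foldl_modify_key models pvPrefixB [] (fun _ m => fun l => l ++ [m])]
  rfl

-- each category's list is the order-preserving filter of the input
theorem pvGetD_eq (models : List String) (c : String) :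
    (models.foldl (fun cats model => cats.modify (pvPrefixB model) [] (fun l => l ++ [model]))
        PySem.Dict.empty).getD c []
      = models.filter (fun m => pvPrefixB m == c) := by
  have h := PySem.Dict.getD_foldl_modify_append
      (models.map (fun m => (pvPrefixB m, m))) (PySem.Dict.empty (κ := String) (ν := List String)) c
  rw [List.foldl_map] at h
  simpa [List.filter_map, Function.comp_def] using h

-- a += fold over blocks is "".join of the blocks
theorem pvFoldl_append_eq_join (g : String → String) (l : List String) (out : String) :
    l.foldl (fun o c => o ++ g c) out = out ++ PySem.Str.join "" (l.map g) := by
  induction l generalizing out with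
  | nil => simp [PySem.Str.join, PySem.Chars.join_nil]
  | cons x xs ih =>
    have hjoin : PySem.Str.join "" (g x :: xs.map g) = g x ++ PySem.Str.join "" (xs.map g) := by
      cases hxs : xs.map g with
      | nil => simp [PySem.Str.join, PySem.Chars.join_singleton, PySem.Chars.join_nil]
      | cons b t => simp [PySem.Str.join, PySem.Chars.join_cons_cons]
    simp only [List.map_cons, List.foldl_cons, hjoin, ih, String.append_assoc]

-- A's two consecutive `output +=` statements, as one join
theorem pvFoldl_append2_eq_join (h r : String → String) (l : List String) (out : String) :
    l.foldl (fun o c => (o ++ h c) ++ r c) out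
      = out ++ PySem.Str.join "" (l.map (fun c => h c ++ r c)) := by
  have hf : (fun (o c : String) => (o ++ h c) ++ r c) = (fun o c => o ++ (h c ++ r c)) := by
    funext o c
    rw [String.append_assoc]
  rw [hf]
  exact pvFoldl_append_eq_join _ l out

-- ===== VERDICT (by name: the statement is the Claim_ definition above) =====
theorem format_models_for_telegram_spec : Claim_equal_format_models_for_telegram := by
  intro models _
  show format_models_for_telegram models = format_models_for_telegram_alt models
  unfold format_models_for_telegram format_models_for_telegram_alt
  rw [pvStepFun_eq]
  dsimp only []
  refine (pvFoldl_append2_eq_join _ _ _ "").trans ?_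
  rw [String.empty_append, pvKeys_eq]
  refine congrArg (PySem.Str.join "") (List.map_congr_left ?_)
  intro c _
  unfold pvCategoryBlock
  rw [pvGetD_eq, pvSortKey_eq]
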